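-- pv_equiv track=rewrite | github.com/pkrittapon/SoftDevII | test/Exercise/Ex7.py | find_x1268
-- ===== SOURCE A (Python) =====
-- def find_x1268(a,c1,c2):# function ที่ไว้หาชุดข้อมูลของ x1,x2,x6,x8 ที่เป็นไปได้ทั้งหมด
--     a = sorted(a)
--     x12 = []
--     x68 = []
--     x1268 = []
--     for i in range(0, len(a)-1):# ใช้หาค่า x1,x2 โดยหาจากสมการ x1+x2=c1 และหาค่า x6,x8 จากสมการ x8=c2+x6
--         for j in range(i+1, len(a)):
--             if a[j] + a[i] == c1:
--                 x12.append([a[i],a[j]])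
--                 x12.append([a[j],a[i]])
--             if c2 < 0:
--                 if a[i] - a[j] == c2:
--                     x68.append([a[j],a[i]])
--             elif c2 >= 0:
--                 if a[j] - a[i] == c2:
--                     x68.append([a[i],a[j]])
--     for i in x12:# ทำการรวมชุดคำตอบของ x1,x2 และ x6,x8 ที่ไม่ซ้ำกัน
--         for j in x68:
--             if not (i[0] in j or i[1] in j):
--                 x1268.append([i[0],i[1],j[0],j[1]])
--     return x1268
-- ===== SOURCE B (Python) =====
-- def find_x1268(a, c1, c2):
--     s = sorted(a)
--     # multiset of the not-yet-visited suffix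
--     cnt = {}
--     for v in s:
--         cnt[v] = cnt.get(v, 0) + 1
--     x12 = []
--     x68 = []
--     for v in s:
--         cnt[v] -= 1
--         k = cnt.get(c1 - v, 0)
--         if k > 0:
--             x12.extend([[v, c1 - v], [c1 - v, v]] * k)
--         m = cnt.get(v + abs(c2), 0)
--         if m > 0:
--             pair = [v, v + c2] if c2 >= 0 else [v - c2, v]
--             x68.extend([pair] * m)
--     return [p + q for p in x12 for q in x68
--             if p[0] not in q and p[1] not in q]
-- ===== Notes on version B (the rewrite author's own statement) =====
-- stated objective: faster
-- what changed: A's O(n^2) double index loop over the sorted list is replaced by a single pass that keeps a dict with the multiset of the not-yet-visited suffix and appends each pair block count-many times at once; the final cross-product join is kept as a comprehension.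
import Mathlib
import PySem

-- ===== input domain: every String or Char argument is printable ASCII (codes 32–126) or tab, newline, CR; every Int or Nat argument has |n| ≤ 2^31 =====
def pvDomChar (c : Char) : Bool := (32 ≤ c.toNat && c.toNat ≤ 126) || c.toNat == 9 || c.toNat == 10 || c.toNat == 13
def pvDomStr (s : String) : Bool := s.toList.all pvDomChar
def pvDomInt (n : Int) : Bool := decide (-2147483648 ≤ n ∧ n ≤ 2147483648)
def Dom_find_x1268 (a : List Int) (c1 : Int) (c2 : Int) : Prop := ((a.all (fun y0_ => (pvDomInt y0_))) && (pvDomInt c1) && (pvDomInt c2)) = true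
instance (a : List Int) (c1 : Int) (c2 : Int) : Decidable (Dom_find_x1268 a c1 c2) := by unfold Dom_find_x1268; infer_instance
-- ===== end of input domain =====

-- B replaces A's quadratic index double-loop over the sorted list by a single pass with a
-- suffix-multiset dictionary collecting the same pair lists; the cross-product join is kept.

-- ===== PORT A =====
-- body of A's inner j-loop (indices are always in range; pyGetD transliterates a[i]/a[j] exactly there)
def aStep (c1 c2 ai : Int) (st : List (List Int) × List (List Int)) (aj : Int) :
    List (List Int) × List (List Int) :=
  (if aj + ai = c1 then st.1 ++ [[ai, aj], [aj, ai]] else st.1,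
   if c2 < 0 then (if ai - aj = c2 then st.2 ++ [[aj, ai]] else st.2)
   else (if aj - ai = c2 then st.2 ++ [[ai, aj]] else st.2))

def find_x1268 (a : List Int) (c1 : Int) (c2 : Int) : List (List Int) :=
  let s := PySem.List.sorted a (fun x => x) false
  let st :=
    (PySem.List.pyRange 0 ((s.length : Int) - 1) 1).foldl
      (fun st i =>
        (PySem.List.pyRange (i + 1) (s.length : Int) 1).foldl
          (fun st j => aStep c1 c2 (PySem.List.pyGetD s i 0) st (PySem.List.pyGetD s j 0)) st)
      ([], [])
  st.1.foldl (fun acc i =>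
    st.2.foldl (fun acc j =>
      if ¬ (PySem.List.pyGetD i 0 0 ∈ j ∨ PySem.List.pyGetD i 1 0 ∈ j) then
        acc ++ [[PySem.List.pyGetD i 0 0, PySem.List.pyGetD i 1 0,
                 PySem.List.pyGetD j 0 0, PySem.List.pyGetD j 1 0]]
      else acc) acc) []

-- ===== PORT B =====
-- body of B's single pass: st.1 is the multiset (as a dict) of the not-yet-visited suffix
def bStep (c1 c2 : Int)
    (st : PySem.Dict Int Int × List (List Int) × List (List Int)) (v : Int) :
    PySem.Dict Int Int × List (List Int) × List (List Int) :=
  let cnt := st.1.insert v (st.1.getD v 0 - 1)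
  let k := cnt.getD (c1 - v) 0
  let x12 := if 0 < k then st.2.1 ++ PySem.List.pyRepeat [[v, c1 - v], [c1 - v, v]] k else st.2.1
  let m := cnt.getD (v + |c2|) 0
  let x68 := if 0 < m then
      st.2.2 ++ PySem.List.pyRepeat [if 0 ≤ c2 then [v, v + c2] else [v - c2, v]] m
    else st.2.2
  (cnt, x12, x68)

def find_x1268_alt (a : List Int) (c1 : Int) (c2 : Int) : List (List Int) :=
  let s := PySem.List.sorted a (fun x => x) false
  let cnt0 : PySem.Dict Int Int :=
    s.foldl (fun d v => d.insert v (d.getD v 0 + 1)) PySem.Dict.empty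
  let st := s.foldl (bStep c1 c2) (cnt0, [], [])
  st.2.1.flatMap (fun p =>
    (st.2.2.filter (fun q =>
        decide (PySem.List.pyGetD p 0 0 ∉ q ∧ PySem.List.pyGetD p 1 0 ∉ q))).map
      (fun q => p ++ q))

-- ===== PRECONDITION & SPEC =====
def Spec_find_x1268 (a : List Int) (c1 : Int) (c2 : Int) (out : List (List Int)) : Prop := out = find_x1268_alt a c1 c2
instance (a : List Int) (c1 : Int) (c2 : Int) (out : List (List Int)) : Decidable (Spec_find_x1268 a c1 c2 out) := by unfold Spec_find_x1268; infer_instance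

-- ===== CLAIM (what is proved, stated in full; the proofs are below) =====
def Claim_equal_find_x1268 : Prop := ∀ (a : List Int) (c1 : Int) (c2 : Int), Dom_find_x1268 a c1 c2 → Spec_find_x1268 a c1 c2 (find_x1268 a c1 c2)

-- ===== LEMMAS AND PROOFS =====

-- n copies of a block, concatenated
def blocks {α : Type} (l : List α) (n : Nat) : List α := (List.replicate n l).flatten

theorem blocks_succ {α : Type} (l : List α) (n : Nat) : blocks l (n + 1) = l ++ blocks l n := by
  simp [blocks, List.replicate_succ]

theorem pyRepeat_natCast_eq_blocks {α : Type} (l : List α) (n : Nat) :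
    PySem.List.pyRepeat l (n : Int) = blocks l n := by
  simp [PySem.List.pyRepeat, blocks]

theorem guard_blocks {α : Type} (x : List α) (l : List α) (n : Nat) :
    (if 0 < ((n : Nat) : Int) then x ++ PySem.List.pyRepeat l (n : Int) else x) = x ++ blocks l n := by
  split_ifs with h
  · rw [pyRepeat_natCast_eq_blocks]
  · have : n = 0 := by omega
    simp [this, blocks]

theorem mem_blocks {α : Type} {x : α} {l : List α} {n : Nat} (h : x ∈ blocks l n) : x ∈ l := by
  simp only [blocks, List.mem_flatten] at h
  obtain ⟨t, ht, hx⟩ := h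
  rw [List.eq_of_mem_replicate ht] at hx
  exact hx

-- a conditional-append loop whose test pins the element to one value t collects count t copies
theorem foldl_ite_block {α : Type} (p : Int → Prop) [DecidablePred p] (t : Int)
    (hp : ∀ w, p w ↔ w = t) (f : Int → List α) (rest : List Int) (x : List α) :
    rest.foldl (fun acc w => if p w then acc ++ f w else acc) x = x ++ blocks (f t) (rest.count t) := by
  induction rest generalizing x with
  | nil => simp [blocks]
  | cons w tl ih =>
    simp only [List.foldl_cons]
    by_cases h : p w
    · have hw : w = t := (hp w).mp h
      subst hw
      rw [if_pos h, ih, List.count_cons_self, blocks_succ, List.append_assoc]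
    · have hw : w ≠ t := fun e => h ((hp w).mpr e)
      rw [if_neg h, ih]
      simp [hw]

-- the common structural recursion both phase-1 loops compute: for each tail v :: rest,
-- append the sum pairs and the difference pairs determined by v and the counts in rest
def go2 (c1 c2 : Int) : List Int → List (List Int) × List (List Int) →
    List (List Int) × List (List Int)
  | [], st => st
  | v :: rest, st =>
      go2 c1 c2 rest
        (st.1 ++ blocks [[v, c1 - v], [c1 - v, v]] (rest.count (c1 - v)),
         st.2 ++ blocks [if 0 ≤ c2 then [v, v + c2] else [v - c2, v]] (rest.count (v + |c2|)))

-- A's inner j-loop over the values of rest performs exactly one go2 step's appends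
theorem aStep_fold (c1 c2 v : Int) (rest : List Int) (st : List (List Int) × List (List Int)) :
    rest.foldl (aStep c1 c2 v) st =
      (st.1 ++ blocks [[v, c1 - v], [c1 - v, v]] (rest.count (c1 - v)),
       st.2 ++ blocks [if 0 ≤ c2 then [v, v + c2] else [v - c2, v]] (rest.count (v + |c2|))) := by
  have hsplit : rest.foldl (aStep c1 c2 v) st =
      (rest.foldl (fun acc w => if w + v = c1 then acc ++ [[v, w], [w, v]] else acc) st.1,
       rest.foldl (fun acc w =>
         if c2 < 0 then (if v - w = c2 then acc ++ [[w, v]] else acc)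
         else (if w - v = c2 then acc ++ [[v, w]] else acc)) st.2) := by
    rw [← PySem.List.foldl_prod_mk]
    rfl
  rw [hsplit]
  have h1 : rest.foldl (fun acc w => if w + v = c1 then acc ++ [[v, w], [w, v]] else acc) st.1 =
      st.1 ++ blocks [[v, c1 - v], [c1 - v, v]] (rest.count (c1 - v)) :=
    foldl_ite_block (fun w => w + v = c1) (c1 - v) (fun w => by omega)
      (fun w => [[v, w], [w, v]]) rest st.1
  rw [h1]
  by_cases hc : c2 < 0
  · have habs : v + |c2| = v - c2 := by rw [abs_of_neg hc]; ring
    have h2 := foldl_ite_block (fun w => v - w = c2) (v - c2) (fun w => by omega)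
      (fun w => [[w, v]]) rest st.2
    simp only [hc, if_true, if_neg (not_le.mpr hc), habs, h2]
  · have h0 : 0 ≤ c2 := not_lt.mp hc
    have habs : v + |c2| = v + c2 := by rw [abs_of_nonneg h0]
    have h2 := foldl_ite_block (fun w => w - v = c2) (v + c2) (fun w => by omega)
      (fun w => [[v, w]]) rest st.2
    simp only [hc, if_false, if_pos h0, habs, h2]

-- A's index double loop from position k equals go2 on the suffix s.drop k
theorem aLoop_eq_go2 (c1 c2 : Int) (s : List Int) (k : Nat) (st : List (List Int) × List (List Int)) :
    (PySem.List.pyRange (k : Int) ((s.length : Int) - 1) 1).foldl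
      (fun st i =>
        (PySem.List.pyRange (i + 1) (s.length : Int) 1).foldl
          (fun st j => aStep c1 c2 (PySem.List.pyGetD s i 0) st (PySem.List.pyGetD s j 0)) st)
      st = go2 c1 c2 (s.drop k) st := by
  induction hfuel : s.length - k generalizing k st with
  | zero =>
    have hk : s.length ≤ k := by omega
    rw [PySem.List.pyRange_one_eq_nil (by omega), List.drop_eq_nil_of_le hk]
    simp [go2]
  | succ fuel ih =>
    have hk : k < s.length := by omega
    have hdrop : s.drop k = s[k] :: s.drop (k + 1) := List.drop_eq_getElem_cons hk
    by_cases hlt : (k : Int) < (s.length : Int) - 1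
    · rw [PySem.List.pyRange_one_cons hlt, List.foldl_cons]
      have hinner := PySem.List.foldl_pyRange_pyGetD' s 0
        (aStep c1 c2 (PySem.List.pyGetD s (k : Int) 0)) st (a := (k : Int) + 1) (by omega)
      have htn : ((k : Int) + 1).toNat = k + 1 := by omega
      rw [htn] at hinner
      rw [hinner, aStep_fold]
      have hget : PySem.List.pyGetD s (k : Int) 0 = s[k] := by
        rw [PySem.List.pyGetD_natCast, List.getD_eq_getElem _ _ hk]
      rw [hget, hdrop]
      have hk1 : ((k : Int) + 1) = ((k + 1 : Nat) : Int) := by push_cast; ring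
      rw [hk1, ih (k + 1) _ (by omega)]
      simp [go2]
    · have hle : (s.length : Int) - 1 ≤ (k : Int) := by omega
      have hk1 : k + 1 = s.length := by omega
      rw [PySem.List.pyRange_one_eq_nil hle, hdrop]
      have hnil : s.drop (k + 1) = [] := by rw [hk1]; simp
      rw [hnil]
      simp [go2, blocks]

-- B's pass equals go2 whenever the dictionary holds the multiset of the remaining suffix
theorem bLoop_eq_go2 (c1 c2 : Int) (r : List Int) (cnt : PySem.Dict Int Int)
    (x12 x68 : List (List Int)) (h : ∀ x, cnt.getD x 0 = (r.count x : Int)) :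
    (r.foldl (bStep c1 c2) (cnt, x12, x68)).2 = go2 c1 c2 r (x12, x68) := by
  induction r generalizing cnt x12 x68 with
  | nil => simp [go2]
  | cons v rest ih =>
    have hcnt : ∀ x, (cnt.insert v (cnt.getD v 0 - 1)).getD x 0 = (rest.count x : Int) := by
      intro x
      rw [PySem.Dict.getD_insert]
      split_ifs with hx
      · subst hx
        rw [h x, List.count_cons_self]
        push_cast
        ring
      · rw [h x, List.count_cons]
        simp [Ne.symm hx]
    simp only [List.foldl_cons, bStep, hcnt]
    rw [guard_blocks, guard_blocks, ih _ _ _ hcnt]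
    simp [go2]

-- every pair either phase-1 list holds is a two-element list
theorem go2_shape (c1 c2 : Int) (r : List Int) (st : List (List Int) × List (List Int))
    (h1 : ∀ p ∈ st.1, ∃ x y : Int, p = [x, y]) (h2 : ∀ p ∈ st.2, ∃ x y : Int, p = [x, y]) :
    (∀ p ∈ (go2 c1 c2 r st).1, ∃ x y : Int, p = [x, y]) ∧
      (∀ p ∈ (go2 c1 c2 r st).2, ∃ x y : Int, p = [x, y]) := by
  induction r generalizing st with
  | nil => exact ⟨h1, h2⟩
  | cons v rest ih =>
    refine ih _ ?_ ?_
    · intro p hp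
      rcases List.mem_append.mp hp with hp | hp
      · exact h1 p hp
      · have hm := mem_blocks hp
        simp only [List.mem_cons, List.not_mem_nil, or_false] at hm
        rcases hm with h | h
        · exact ⟨v, c1 - v, h⟩
        · exact ⟨c1 - v, v, h⟩
    · intro p hp
      rcases List.mem_append.mp hp with hp | hp
      · exact h2 p hp
      · have hp' := mem_blocks hp
        simp only [List.mem_singleton] at hp'
        by_cases hc : 0 ≤ c2
        · exact ⟨v, v + c2, by simp [hp', hc]⟩
        · exact ⟨v - c2, v, by simp [hp', hc]⟩

-- the two phase-2 joins agree on lists of two-element pairs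
theorem join_eq (x12 x68 : List (List Int))
    (h1 : ∀ p ∈ x12, ∃ x y : Int, p = [x, y]) (h2 : ∀ p ∈ x68, ∃ x y : Int, p = [x, y]) :
    x12.foldl (fun acc i =>
      x68.foldl (fun acc j =>
        if ¬ (PySem.List.pyGetD i 0 0 ∈ j ∨ PySem.List.pyGetD i 1 0 ∈ j) then
          acc ++ [[PySem.List.pyGetD i 0 0, PySem.List.pyGetD i 1 0,
                   PySem.List.pyGetD j 0 0, PySem.List.pyGetD j 1 0]]
        else acc) acc) [] =
    x12.flatMap (fun p =>
      (x68.filter (fun q =>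
          decide (PySem.List.pyGetD p 0 0 ∉ q ∧ PySem.List.pyGetD p 1 0 ∉ q))).map
        (fun q => p ++ q)) := by
  rw [PySem.List.foldl_congr_mem (g := fun acc p =>
      acc ++ (x68.filter (fun q =>
          decide (PySem.List.pyGetD p 0 0 ∉ q ∧ PySem.List.pyGetD p 1 0 ∉ q))).map
        (fun q => p ++ q))]
  · exact PySem.List.foldl_append_eq_flatMap _ _ _
  · intro acc p hp
    obtain ⟨x, y, rfl⟩ := h1 p hp
    have g0 : PySem.List.pyGetD ([x, y] : List Int) 0 0 = x := rfl
    have g1 : PySem.List.pyGetD ([x, y] : List Int) 1 0 = y := rfl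
    rw [PySem.List.foldl_congr_mem (g := fun acc q =>
        if (x ∉ q ∧ y ∉ q) then acc ++ [[x, y] ++ q] else acc)]
    · rw [PySem.List.foldl_append_ite (fun q => x ∉ q ∧ y ∉ q) (fun q => [x, y] ++ q) x68 acc]
      simp [g0, g1]
    · intro acc q hq
      obtain ⟨u, w, rfl⟩ := h2 q hq
      have q0 : PySem.List.pyGetD ([u, w] : List Int) 0 0 = u := rfl
      have q1 : PySem.List.pyGetD ([u, w] : List Int) 1 0 = w := rfl
      rw [g0, g1, q0, q1]
      by_cases hc : x ∈ ([u, w] : List Int) ∨ y ∈ ([u, w] : List Int)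
      · rw [if_neg (not_not_intro hc), if_neg (by tauto)]
      · rw [if_pos hc, if_pos (by tauto)]
        rfl

theorem main_eq (a : List Int) (c1 c2 : Int) : find_x1268 a c1 c2 = find_x1268_alt a c1 c2 := by
  unfold find_x1268 find_x1268_alt
  dsimp only
  set s := PySem.List.sorted a (fun x => x) false with hs
  have hA : (PySem.List.pyRange 0 ((s.length : Int) - 1) 1).foldl
      (fun st i =>
        (PySem.List.pyRange (i + 1) (s.length : Int) 1).foldl
          (fun st j => aStep c1 c2 (PySem.List.pyGetD s i 0) st (PySem.List.pyGetD s j 0)) st)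
      ([], []) = go2 c1 c2 s ([], []) := by
    have := aLoop_eq_go2 c1 c2 s 0 ([], [])
    simpa using this
  have hcnt0 : ∀ x, (s.foldl (fun d v => d.insert v (d.getD v 0 + 1)) PySem.Dict.empty).getD x 0
      = (s.count x : Int) := by
    intro x
    rw [PySem.Dict.getD_foldl_insert_add_one]
    simp
  have hB : (s.foldl (bStep c1 c2)
      (s.foldl (fun d v => d.insert v (d.getD v 0 + 1)) PySem.Dict.empty, [], [])).2
      = go2 c1 c2 s ([], []) :=
    bLoop_eq_go2 c1 c2 s _ [] [] hcnt0
  have hshape := go2_shape c1 c2 s ([], []) (by simp) (by simp)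
  rw [hA, hB]
  exact join_eq _ _ hshape.1 hshape.2

-- ===== VERDICT (by name: the statement is the Claim_ definition above) =====
theorem find_x1268_spec : Claim_equal_find_x1268 := by
  intro a c1 c2 _
  unfold Spec_find_x1268
  exact main_eq a c1 c2
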